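-- pv_equiv track=rewrite | github.com/syj-student/Study | problem/programmers/연습문제/N으로 표현.py | solution
-- ===== SOURCE A (Python) =====
-- def solution(N, number):
-- 	dp_table = [set() for _ in range(9)]
-- 	for i in range(1, 9):
-- 		dp_table[i].add(int(str(N) * i))
-- 		for k in range(1, i):
-- 			if k <= i - k:
-- 				y = i - k
-- 				for x in dp_table[k]:
-- 					for j in dp_table[y]:
-- 						dp_table[i].add(j + x)
-- 						dp_table[i].add(j - x)
-- 						dp_table[i].add(j * x)
-- 						dp_table[i].add(x - j)
-- 						if x != 0:
-- 							dp_table[i].add(j // x)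
-- 						if j != 0:
-- 							dp_table[i].add(x // j)
-- 		if number in dp_table[i]:
-- 			return i
-- 	return -1
-- ===== SOURCE B (Python) =====
-- def solution(N, number):
--     # Memoized recursion: reachable(i) = set of values formable with exactly i copies of N.
--     cache = {}
--
--     def reachable(i):
--         if i in cache:
--             return cache[i]
--         s = {int(str(N) * i)}
--         for k in range(1, i):
--             for x in reachable(k):
--                 for j in reachable(i - k):
--                     s.add(j + x)
--                     s.add(j - x)
--                     s.add(j * x)
--                     if x != 0:
--                         s.add(j // x)
--         cache[i] = s
--         return s
--
--     for i in range(1, 9):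
--         if number in reachable(i):
--             return i
--     return -1
-- ===== Notes on version B (the rewrite author's own statement) =====
-- stated objective: alternative
-- what changed: Replaces A's bottom-up 9-slot dp table that only visits splits with k <= i-k and compensates with six operations (including both subtraction/division orders) by a memoized recursive reachable(i) that visits every split k in 1..i-1 with just four operations, both orders arising from the symmetric splits.
import Mathlib
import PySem

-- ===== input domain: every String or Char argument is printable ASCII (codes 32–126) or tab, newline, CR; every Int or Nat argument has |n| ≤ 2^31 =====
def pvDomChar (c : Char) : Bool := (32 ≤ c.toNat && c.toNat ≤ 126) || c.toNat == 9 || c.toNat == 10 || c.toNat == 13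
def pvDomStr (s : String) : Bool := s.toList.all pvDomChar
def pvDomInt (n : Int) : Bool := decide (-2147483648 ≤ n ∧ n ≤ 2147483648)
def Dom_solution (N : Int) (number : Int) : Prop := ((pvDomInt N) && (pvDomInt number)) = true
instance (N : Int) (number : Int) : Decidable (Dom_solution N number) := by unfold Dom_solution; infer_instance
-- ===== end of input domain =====

-- B re-implements A's bottom-up 9-slot dp table (k ≤ i-k splits, six operations) as a
-- memoized recursion over all splits with four operations; objective: alternative decomposition.

-- ===== PORT A =====

-- int(str(N) * i); Python raises ValueError iff N < 0 and i ≥ 2 (ofChars? = none there);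
-- those inputs are excluded by Pre_solution, `.getD 0` is reached only outside Pre_.
def repA (N : Int) (i : Nat) : Int :=
  (PySem.Int.ofChars? (List.flatten (List.replicate i (PySem.Int.toChars N)))).getD 0

-- the six dp_table[i].add(...) statements of A's innermost loop body
def addSixA (s : PySem.Set Int) (x j : Int) : PySem.Set Int :=
  let s1 := PySem.Set.add (PySem.Set.add (PySem.Set.add (PySem.Set.add s (j + x)) (j - x)) (j * x)) (x - j)
  let s2 := if x ≠ 0 then PySem.Set.add s1 (PySem.Int.floordiv j x) else s1
  if j ≠ 0 then PySem.Set.add s2 (PySem.Int.floordiv x j) else s2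

-- for k in range(1, i): if k <= i - k: for x in dp[k]: for j in dp[i-k]: six adds
def buildA (dp : List (PySem.Set Int)) (i : Nat) (base : PySem.Set Int) : PySem.Set Int :=
  (List.range' 1 (i - 1)).foldl
    (fun s k =>
      if k ≤ i - k then
        (dp.getD k PySem.Set.empty).foldl
          (fun s x => (dp.getD (i - k) PySem.Set.empty).foldl (fun s j => addSixA s x j) s) s
      else s)
    base

-- the for i in range(1, 9) loop with its early return; dp holds dp_table[0..i-1]
def goA (N number : Int) (dp : List (PySem.Set Int)) : List Nat → Int
  | [] => -1
  | i :: rest =>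
    let s := buildA dp i (PySem.Set.add PySem.Set.empty (repA N i))
    if PySem.Set.contains s number then (i : Int) else goA N number (dp ++ [s]) rest

def solution (N : Int) (number : Int) : Int :=
  goA N number [PySem.Set.empty] (List.range' 1 8)

-- ===== PORT B =====

-- int(str(N) * i), as in Source B's reachable()
def repB (N : Int) (i : Nat) : Int :=
  (PySem.Int.ofChars? (List.flatten (List.replicate i (PySem.Int.toChars N)))).getD 0

-- the four s.add(...) statements of Source B's innermost loop
def addFourB (s : PySem.Set Int) (x j : Int) : PySem.Set Int :=
  let s1 := PySem.Set.add (PySem.Set.add (PySem.Set.add s (j + x)) (j - x)) (j * x)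
  if x ≠ 0 then PySem.Set.add s1 (PySem.Int.floordiv j x) else s1

-- reachable(i): memoized recursion; the mutable cache dict is threaded through as state
def reachGo (N : Int) (i : Nat) (cache : PySem.Dict Nat (PySem.Set Int)) :
    PySem.Set Int × PySem.Dict Nat (PySem.Set Int) :=
  match cache.get? i with
  | some s => (s, cache)
  | none =>
    let p := (List.range' 1 (i - 1)).attach.foldl
      (fun (p : PySem.Set Int × PySem.Dict Nat (PySem.Set Int)) kk =>
        let q1 := reachGo N kk.1 p.2
        let q2 := reachGo N (i - kk.1) q1.2
        (q1.1.foldl (fun s x => q2.1.foldl (fun s j => addFourB s x j) s) p.1, q2.2))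
      (PySem.Set.add PySem.Set.empty (repB N i), cache)
    (p.1, p.2.insert i p.1)
termination_by i
decreasing_by
  · rcases List.mem_range'_1.mp kk.2 with ⟨h1, h2⟩; omega
  · rcases List.mem_range'_1.mp kk.2 with ⟨h1, h2⟩; omega

-- for i in range(1, 9): if number in reachable(i): return i / return -1
def altGo (N number : Int) (cache : PySem.Dict Nat (PySem.Set Int)) : List Nat → Int
  | [] => -1
  | i :: rest =>
    let q := reachGo N i cache
    if PySem.Set.contains q.1 number then (i : Int) else altGo N number q.2 rest

def solution_alt (N : Int) (number : Int) : Int :=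
  altGo N number PySem.Dict.empty (List.range' 1 8)

-- ===== PRECONDITION & SPEC =====
-- Python A raises ValueError on int(str(N)*i) when N < 0 (unless it returns 1 at i = 1
-- because number == N); Source B raises on exactly the same inputs. Pre_ excludes them.
def Pre_solution (N : Int) (number : Int) : Prop := 0 ≤ N ∨ number = N
instance (N : Int) (number : Int) : Decidable (Pre_solution N number) := by
  unfold Pre_solution; infer_instance

def pvWitness_solution : Int × Int := (5, 12)

def Spec_solution (N : Int) (number : Int) (out : Int) : Prop := out = solution_alt N number
instance (N : Int) (number : Int) (out : Int) : Decidable (Spec_solution N number out) := by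
  unfold Spec_solution; infer_instance

-- ===== CLAIM (what is proved, stated in full; the proofs are below) =====
def Claim_equal_solution : Prop := ∀ (N : Int) (number : Int), Dom_solution N number → Pre_solution N number → Spec_solution N number (solution N number)

-- ===== LEMMAS AND PROOFS =====

-- the value set A accumulates in dp_table[i], as a standalone recursion
def SA (N : Int) (i : Nat) : PySem.Set Int :=
  (List.range' 1 (i - 1)).attach.foldl
    (fun s kk =>
      if kk.1 ≤ i - kk.1 then
        (SA N kk.1).foldl
          (fun s x => (SA N (i - kk.1)).foldl (fun s j => addSixA s x j) s) s
      else s)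
    (PySem.Set.add PySem.Set.empty (repA N i))
termination_by i
decreasing_by
  · rcases List.mem_range'_1.mp kk.2 with ⟨h1, h2⟩; omega
  · rcases List.mem_range'_1.mp kk.2 with ⟨h1, h2⟩; omega

-- the VALUE of Source B's reachable(i), cache-free (proof-side mirror of reachGo)
def reachB (N : Int) (i : Nat) : PySem.Set Int :=
  (List.range' 1 (i - 1)).attach.foldl
    (fun s kk =>
      (reachB N kk.1).foldl
        (fun s x => (reachB N (i - kk.1)).foldl (fun s j => addFourB s x j) s) s)
    (PySem.Set.add PySem.Set.empty (repB N i))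
termination_by i
decreasing_by
  · rcases List.mem_range'_1.mp kk.2 with ⟨h1, h2⟩; omega
  · rcases List.mem_range'_1.mp kk.2 with ⟨h1, h2⟩; omega

-- what A's early-return loop computes, in terms of SA
def findSA (N number : Int) : Nat → Nat → Int
  | _, 0 => -1
  | i, cnt + 1 =>
    if PySem.Set.contains (SA N i) number then (i : Int) else findSA N number (i + 1) cnt

def P4 (x j v : Int) : Prop :=
  v = j + x ∨ v = j - x ∨ v = j * x ∨ (x ≠ 0 ∧ v = PySem.Int.floordiv j x)

def P6 (x j v : Int) : Prop :=
  v = j + x ∨ v = j - x ∨ v = j * x ∨ v = x - j ∨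
    (x ≠ 0 ∧ v = PySem.Int.floordiv j x) ∨ (j ≠ 0 ∧ v = PySem.Int.floordiv x j)

lemma P6_iff (x j v : Int) : P6 x j v ↔ P4 x j v ∨ P4 j x v := by
  unfold P6 P4
  constructor
  · rintro (h | h | h | h | h | h)
    · exact Or.inl (Or.inl h)
    · exact Or.inl (Or.inr (Or.inl h))
    · exact Or.inl (Or.inr (Or.inr (Or.inl h)))
    · exact Or.inr (Or.inr (Or.inl h))
    · exact Or.inl (Or.inr (Or.inr (Or.inr h)))
    · exact Or.inr (Or.inr (Or.inr (Or.inr h)))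
  · rintro ((h | h | h | h) | (h | h | h | h))
    · exact Or.inl h
    · exact Or.inr (Or.inl h)
    · exact Or.inr (Or.inr (Or.inl h))
    · exact Or.inr (Or.inr (Or.inr (Or.inr (Or.inl h))))
    · exact Or.inl (by rw [h]; ring)
    · exact Or.inr (Or.inr (Or.inr (Or.inl h)))
    · exact Or.inr (Or.inr (Or.inl (by rw [h]; ring)))
    · exact Or.inr (Or.inr (Or.inr (Or.inr (Or.inr h))))

lemma mem_addSixA (s : PySem.Set Int) (x j v : Int) :
    v ∈ addSixA s x j ↔ v ∈ s ∨ P6 x j v := by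
  unfold addSixA P6
  split_ifs with h1 h2 h2 <;> simp [PySem.Set.mem_add] <;> tauto

lemma mem_addFourB (s : PySem.Set Int) (x j v : Int) :
    v ∈ addFourB s x j ↔ v ∈ s ∨ P4 x j v := by
  unfold addFourB P4
  split_ifs with h1 <;> simp [PySem.Set.mem_add] <;> tauto

-- membership through a fold that only adds elements
lemma mem_foldl_adds {α : Type} (g : PySem.Set Int → α → PySem.Set Int) (P : α → Int → Prop)
    (hg : ∀ s x v, v ∈ g s x ↔ v ∈ s ∨ P x v) :
    ∀ (l : List α) (s0 : PySem.Set Int) (v : Int),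
      v ∈ l.foldl g s0 ↔ v ∈ s0 ∨ ∃ x ∈ l, P x v := by
  intro l
  induction l with
  | nil => simp
  | cons a l ih => intro s0 v; simp [List.foldl_cons, ih, hg]; tauto

lemma mem_SA (N : Int) (i : Nat) (v : Int) :
    v ∈ SA N i ↔ v = repA N i ∨
      ∃ k, (1 ≤ k ∧ k < i) ∧ k ≤ i - k ∧
        ∃ x ∈ SA N k, ∃ j ∈ SA N (i - k), P6 x j v := by
  have hj : ∀ (x : Int) (T s : PySem.Set Int) (v : Int),
      v ∈ T.foldl (fun s j => addSixA s x j) s ↔ v ∈ s ∨ ∃ j ∈ T, P6 x j v :=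
    fun x T s v => mem_foldl_adds _ _ (fun s j v => mem_addSixA s x j v) T s v
  have hx : ∀ (k : Nat) (s : PySem.Set Int) (v : Int),
      v ∈ (SA N k).foldl
          (fun s x => (SA N (i - k)).foldl (fun s j => addSixA s x j) s) s ↔
        v ∈ s ∨ ∃ x ∈ SA N k, ∃ j ∈ SA N (i - k), P6 x j v :=
    fun k s v => mem_foldl_adds _ _ (fun s x v => hj x _ s v) _ s v
  rw [SA]
  rw [mem_foldl_adds _
      (fun (kk : {x // x ∈ List.range' 1 (i - 1)}) v =>
        kk.1 ≤ i - kk.1 ∧ ∃ x ∈ SA N kk.1, ∃ j ∈ SA N (i - kk.1), P6 x j v)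
      (by
        intro s kk v
        split_ifs with hc
        · rw [hx kk.1 s v]; tauto
        · tauto)]
  constructor
  · rintro (hb | ⟨kk, -, hP⟩)
    · left; simpa [PySem.Set.mem_add, PySem.Set.empty] using hb
    · right
      rcases List.mem_range'_1.mp kk.2 with ⟨h1, h2⟩
      exact ⟨kk.1, ⟨h1, by omega⟩, hP⟩
  · rintro (hb | ⟨k, ⟨h1, h2⟩, hP⟩)
    · left; simp [PySem.Set.empty, hb]
    · right
      exact ⟨⟨k, List.mem_range'_1.mpr ⟨h1, by omega⟩⟩, List.mem_attach _ _, hP⟩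

lemma mem_reachB (N : Int) (i : Nat) (v : Int) :
    v ∈ reachB N i ↔ v = repB N i ∨
      ∃ k, (1 ≤ k ∧ k < i) ∧ ∃ x ∈ reachB N k, ∃ j ∈ reachB N (i - k), P4 x j v := by
  have hj : ∀ (x : Int) (T s : PySem.Set Int) (v : Int),
      v ∈ T.foldl (fun s j => addFourB s x j) s ↔ v ∈ s ∨ ∃ j ∈ T, P4 x j v :=
    fun x T s v => mem_foldl_adds _ _ (fun s j v => mem_addFourB s x j v) T s v
  rw [reachB]
  rw [mem_foldl_adds _
      (fun (kk : {x // x ∈ List.range' 1 (i - 1)}) v =>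
        ∃ x ∈ reachB N kk.1, ∃ j ∈ reachB N (i - kk.1), P4 x j v)
      (fun s kk v => mem_foldl_adds _ _ (fun s x v => hj x _ s v) _ s v)]
  constructor
  · rintro (hb | ⟨kk, -, hP⟩)
    · left; simpa [PySem.Set.mem_add, PySem.Set.empty] using hb
    · right
      rcases List.mem_range'_1.mp kk.2 with ⟨h1, h2⟩
      exact ⟨kk.1, ⟨h1, by omega⟩, hP⟩
  · rintro (hb | ⟨k, ⟨h1, h2⟩, hP⟩)
    · left; simp [PySem.Set.empty, hb]
    · right
      exact ⟨⟨k, List.mem_range'_1.mpr ⟨h1, by omega⟩⟩, List.mem_attach _ _, hP⟩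

lemma mem_SA_iff_reachB (N : Int) : ∀ i, ∀ v, (v ∈ SA N i ↔ v ∈ reachB N i) := by
  intro i
  induction i using Nat.strong_induction_on with
  | _ i ih =>
    intro v
    have hrep : repA N i = repB N i := rfl
    rw [mem_SA, mem_reachB]
    constructor
    · rintro (h | ⟨k, ⟨h1, h2⟩, hle, x, hx, j, hj, h6⟩)
      · left; rw [← hrep]; exact h
      · right
        rcases (P6_iff x j v).mp h6 with h4 | h4
        · exact ⟨k, ⟨h1, h2⟩, x, (ih k h2 x).mp hx, j, (ih (i - k) (by omega) j).mp hj, h4⟩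
        · refine ⟨i - k, ⟨by omega, by omega⟩, j, (ih (i - k) (by omega) j).mp hj, x, ?_, h4⟩
          have hk : i - (i - k) = k := by omega
          rw [hk]; exact (ih k h2 x).mp hx
    · rintro (h | ⟨k, ⟨h1, h2⟩, x, hx, j, hj, h4⟩)
      · left; rw [hrep]; exact h
      · right
        by_cases hc : k ≤ i - k
        · exact ⟨k, ⟨h1, h2⟩, hc, x, (ih k h2 x).mpr hx, j,
            (ih (i - k) (by omega) j).mpr hj, (P6_iff x j v).mpr (Or.inl h4)⟩
        · refine ⟨i - k, ⟨by omega, by omega⟩, by omega, j,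
            (ih (i - k) (by omega) j).mpr hj, x, ?_, (P6_iff j x v).mpr (Or.inr h4)⟩
          have hk : i - (i - k) = k := by omega
          rw [hk]; exact (ih k h2 x).mpr hx

lemma contains_SA_eq (N number : Int) (i : Nat) :
    PySem.Set.contains (SA N i) number = PySem.Set.contains (reachB N i) number := by
  rcases h : PySem.Set.contains (reachB N i) number with _ | _
  · rcases h2 : PySem.Set.contains (SA N i) number with _ | _
    · rfl
    · exfalso
      have := (PySem.Set.contains_iff _ _).mp h2
      have := (mem_SA_iff_reachB N i number).mp this
      have := (PySem.Set.contains_iff _ _).mpr this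
      rw [h] at this; exact Bool.false_ne_true this
  · exact (PySem.Set.contains_iff _ _).mpr ((mem_SA_iff_reachB N i number).mpr
      ((PySem.Set.contains_iff _ _).mp h))

lemma buildA_eq_SA (N : Int) (dp : List (PySem.Set Int)) (i : Nat)
    (hdp : ∀ k, 1 ≤ k → k < i → dp.getD k PySem.Set.empty = SA N k) :
    buildA dp i (PySem.Set.add PySem.Set.empty (repA N i)) = SA N i := by
  rw [SA, List.foldl_attach
    (f := fun s k =>
      if k ≤ i - k then
        List.foldl (fun s x => List.foldl (fun s j => addSixA s x j) s (SA N (i - k))) s (SA N k)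
      else s)]
  unfold buildA
  apply PySem.List.foldl_congr_mem
  intro s k hk
  rcases List.mem_range'_1.mp hk with ⟨h1, h2⟩
  rw [hdp k h1 (by omega), hdp (i - k) (by omega) (by omega)]

lemma goA_eq_findSA (N number : Int) :
    ∀ (cnt i : Nat) (dp : List (PySem.Set Int)), dp.length = i →
      (∀ k, 1 ≤ k → k < i → dp.getD k PySem.Set.empty = SA N k) →
      goA N number dp (List.range' i cnt) = findSA N number i cnt := by
  intro cnt
  induction cnt with
  | zero => intro i dp _ _; simp [goA, findSA]
  | succ n ih =>
    intro i dp hlen hdp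
    rw [List.range'_succ]
    simp only [goA, buildA_eq_SA N dp i hdp, findSA]
    rcases h : PySem.Set.contains (SA N i) number with _ | _
    · simp only [Bool.false_eq_true, if_false]
      apply ih (i + 1) (dp ++ [SA N i]) (by simp [hlen])
      intro k h1 h2
      rcases Nat.lt_or_ge k i with hlt | hge
      · rw [List.getD_append _ _ _ _ (by omega), hdp k h1 hlt]
      · have hk : k = i := by omega
        subst hk
        rw [List.getD_append_right _ _ _ _ (by omega)]
        simp [hlen]
    · simp only [if_true]

-- the cache invariant: every stored entry is the cache-free value
def InvC (N : Int) (c : PySem.Dict Nat (PySem.Set Int)) : Prop :=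
  ∀ k s, c.get? k = some s → s = reachB N k

lemma reachGo_correct (N : Int) :
    ∀ (i : Nat) (cache : PySem.Dict Nat (PySem.Set Int)), InvC N cache →
      (reachGo N i cache).1 = reachB N i ∧ InvC N (reachGo N i cache).2 := by
  intro i
  induction i using Nat.strong_induction_on with
  | _ i ih =>
    intro cache hc
    rw [reachGo]
    rcases hg : cache.get? i with _ | s
    · simp only []
      have hfold : ∀ (l : List {x // x ∈ List.range' 1 (i - 1)})
          (s0 : PySem.Set Int) (c0 : PySem.Dict Nat (PySem.Set Int)), InvC N c0 →
          (l.foldl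
              (fun (p : PySem.Set Int × PySem.Dict Nat (PySem.Set Int)) kk =>
                let q1 := reachGo N kk.1 p.2
                let q2 := reachGo N (i - kk.1) q1.2
                (q1.1.foldl (fun s x => q2.1.foldl (fun s j => addFourB s x j) s) p.1, q2.2))
              (s0, c0)).1 =
            l.foldl
              (fun s kk =>
                (reachB N kk.1).foldl
                  (fun s x => (reachB N (i - kk.1)).foldl (fun s j => addFourB s x j) s) s)
              s0 ∧
          InvC N (l.foldl
              (fun (p : PySem.Set Int × PySem.Dict Nat (PySem.Set Int)) kk =>
                let q1 := reachGo N kk.1 p.2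
                let q2 := reachGo N (i - kk.1) q1.2
                (q1.1.foldl (fun s x => q2.1.foldl (fun s j => addFourB s x j) s) p.1, q2.2))
              (s0, c0)).2 := by
        intro l
        induction l with
        | nil => intro s0 c0 h0; exact ⟨rfl, h0⟩
        | cons kk l ihl =>
          intro s0 c0 h0
          rcases List.mem_range'_1.mp kk.2 with ⟨hk1, hk2⟩
          have e1 := ih kk.1 (by omega) c0 h0
          have e2 := ih (i - kk.1) (by omega) (reachGo N kk.1 c0).2 e1.2
          simp only [List.foldl_cons, e1.1, e2.1]
          exact ihl _ _ e2.2
      have h2 := hfold (List.range' 1 (i - 1)).attach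
        (PySem.Set.add PySem.Set.empty (repB N i)) cache hc
      constructor
      · rw [h2.1, ← reachB]
      · intro k s hks
        rcases hik : decide (k = i) with _ | _
        · have hne : k ≠ i := by simpa using hik
          rw [PySem.Dict.get?_insert_of_ne _ _ hne] at hks
          exact h2.2 k s hks
        · have heq : k = i := by simpa using hik
          subst heq
          rw [PySem.Dict.get?_insert_self] at hks
          rw [← Option.some_inj.mp hks, h2.1, ← reachB]
    · simp only []
      exact ⟨hc i s hg, hc⟩

lemma altGo_eq_findSA (N number : Int) :
    ∀ (cnt i : Nat) (cache : PySem.Dict Nat (PySem.Set Int)), InvC N cache →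
      altGo N number cache (List.range' i cnt) = findSA N number i cnt := by
  intro cnt
  induction cnt with
  | zero => intro i cache _; simp [altGo, findSA]
  | succ n ih =>
    intro i cache hc
    rw [List.range'_succ]
    simp only [altGo, (reachGo_correct N i cache hc).1, ← contains_SA_eq N number i, findSA]
    rcases h : PySem.Set.contains (SA N i) number with _ | _
    · simp only [Bool.false_eq_true, if_false]
      exact ih (i + 1) _ (reachGo_correct N i cache hc).2
    · simp only [if_true]

-- ===== VERDICT (by name: the statement is the Claim_ definition above) =====
theorem solution_spec : Claim_equal_solution := by
  intro N number _ _
  unfold Spec_solution solution solution_alt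
  rw [goA_eq_findSA N number 8 1 [PySem.Set.empty] rfl (by intro k h1 h2; omega)]
  rw [altGo_eq_findSA N number 8 1 PySem.Dict.empty (by intro k s h; simp [PySem.Dict.get?_empty] at h)]
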